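-- pv_equiv track=rewrite | github.com/The-Coding-Park/leetCode | 1twosum.py | SumTwo
-- ===== SOURCE A (Python) =====
-- def SumTwo(lst,target):
--     sum=0
--     s=[]
--
--     for i in range(len(lst)-1):
--         if(sum<target):
--             sum=sum+lst[i]
--             s.append(i)
--         else:
--             break
--     return s
-- ===== SOURCE B (Python) =====
-- from itertools import accumulate
--
--
-- def SumTwo(lst, target):
--     # prefix-sum table: p[i] = sum(lst[:i]), so p[0] = 0
--     p = list(accumulate(lst, initial=0))
--     # cut index: first i in range(len(lst)-1) whose prefix sum reaches target,
--     # otherwise len(lst)-1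
--     j = next((i for i in range(len(lst) - 1) if p[i] >= target), len(lst) - 1)
--     return list(range(j))
-- ===== Notes on version B (the rewrite author's own statement) =====
-- stated objective: alternative
-- what changed: B materialises the prefix-sum table with itertools.accumulate, finds the cut index with a separate next()-search, and returns list(range(j)), instead of A's single fused loop that accumulates, appends indices and breaks.
import Mathlib
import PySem

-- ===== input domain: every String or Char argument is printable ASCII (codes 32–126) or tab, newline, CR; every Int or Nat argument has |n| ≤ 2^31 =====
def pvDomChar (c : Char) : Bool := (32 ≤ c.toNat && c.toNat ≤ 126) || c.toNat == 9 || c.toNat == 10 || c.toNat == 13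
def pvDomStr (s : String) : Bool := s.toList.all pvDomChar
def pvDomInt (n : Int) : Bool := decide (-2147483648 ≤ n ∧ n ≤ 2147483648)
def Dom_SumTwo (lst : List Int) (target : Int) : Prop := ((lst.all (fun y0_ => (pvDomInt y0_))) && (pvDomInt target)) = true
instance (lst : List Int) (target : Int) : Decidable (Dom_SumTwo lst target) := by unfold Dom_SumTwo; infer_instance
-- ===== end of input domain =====

-- B builds the prefix-sum table, searches the cut index separately, and returns range(j);
-- A fuses accumulation, index collection and the break in one loop. Objective: alternative.


-- ===== PORT A =====
-- the for-loop with its break: state is (sum, s); indices come from range(len(lst)-1)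
def sumTwoGo (lst : List Int) (target : Int) (idxs : List Int) (sum : Int) (s : List Int) : List Int :=
  match idxs with
  | [] => s
  | i :: rest =>
      if sum < target then
        -- i is always a valid index here, so the IndexError default is never used
        sumTwoGo lst target rest (sum + PySem.List.pyGetD lst i 0) (s ++ [i])
      else s

def SumTwo (lst : List Int) (target : Int) : List Int :=
  sumTwoGo lst target (PySem.List.pyRange 0 ((lst.length : Int) - 1) 1) 0 []

-- ===== PORT B =====
-- itertools.accumulate(lst, initial=0): running sums after the seed
def accumGo (cur : Int) : List Int → List Int
  | [] => []
  | x :: xs => (cur + x) :: accumGo (cur + x) xs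

def prefixTable (lst : List Int) : List Int := 0 :: accumGo 0 lst

def SumTwo_alt (lst : List Int) (target : Int) : List Int :=
  PySem.List.pyRange 0
    (match (List.range (lst.length - 1)).find?
        (fun i => target ≤ (prefixTable lst).getD i 0) with
     | some i => (i : Int)
     | none => (lst.length : Int) - 1) 1

-- ===== PRECONDITION & SPEC =====
def Spec_SumTwo (lst : List Int) (target : Int) (out : List Int) : Prop := out = SumTwo_alt lst target
instance (lst : List Int) (target : Int) (out : List Int) : Decidable (Spec_SumTwo lst target out) := by unfold Spec_SumTwo; infer_instance

-- ===== CLAIM (what is proved, stated in full; the proofs are below) =====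
def Claim_equal_SumTwo : Prop := ∀ (lst : List Int) (target : Int), Dom_SumTwo lst target → Spec_SumTwo lst target (SumTwo lst target)

-- ===== LEMMAS AND PROOFS =====

-- prefix table reads back the partial sums
lemma accumGo_getD (xs : List Int) : ∀ (c : Int) (k : Nat), k < xs.length →
    (accumGo c xs).getD k 0 = c + ((xs.take (k+1)).sum) := by
  induction xs with
  | nil => intro c k h; simp at h
  | cons x xs ih =>
      intro c k h
      cases k with
      | zero => simp [accumGo]
      | succ k =>
          simp only [accumGo, List.getD_cons_succ, List.take_succ_cons, List.sum_cons]
          rw [ih (c + x) k (by simpa using h)]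
          ring

lemma prefixTable_getD (lst : List Int) (k : Nat) (h : k ≤ lst.length) :
    (prefixTable lst).getD k 0 = ((lst.take k).sum) := by
  cases k with
  | zero => simp [prefixTable]
  | succ k =>
      simp only [prefixTable, List.getD_cons_succ]
      rw [accumGo_getD lst 0 k (by omega)]
      simp

-- A's loop over the suffix of indices, with the invariant sum = Σ lst.take k, s = range k
lemma sumTwoGo_eq (lst : List Int) (target : Int) : ∀ (m k : Nat), k + m ≤ lst.length →
    sumTwoGo lst target ((List.range' k m).map Int.ofNat) ((lst.take k).sum)
        ((List.range k).map Int.ofNat)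
    = (List.range (match (List.range' k m).find?
          (fun i => decide (target ≤ (lst.take i).sum)) with
        | some i => i
        | none => k + m)).map Int.ofNat := by
  intro m
  induction m with
  | zero => intro k hk; simp [sumTwoGo]
  | succ m ih =>
      intro k hk
      rw [List.range'_succ]
      simp only [List.map_cons, sumTwoGo, List.find?_cons]
      by_cases h : (lst.take k).sum < target
      · rw [if_pos h]
        have hd : (decide (target ≤ (lst.take k).sum)) = false := by simp; omega
        rw [hd]
        have hget : PySem.List.pyGetD lst (Int.ofNat k) 0 = lst.getD k 0 := by
          simp [PySem.List.pyGetD_natCast]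
        have hk' : k < lst.length := by omega
        have htake : lst.take (k+1) = lst.take k ++ [lst[k]] := by
          rw [List.take_add_one, List.getElem?_eq_getElem hk']; rfl
        have hsum : (lst.take k).sum + PySem.List.pyGetD lst (Int.ofNat k) 0
            = (lst.take (k+1)).sum := by
          rw [hget, List.getD_eq_getElem lst 0 hk', htake, List.sum_append,
            List.sum_cons, List.sum_nil]
          ring
        have hs : (List.range k).map Int.ofNat ++ [Int.ofNat k]
            = (List.range (k+1)).map Int.ofNat := by
          rw [List.range_succ]; simp
        rw [hsum, hs, ih (k+1) (by omega)]
        have : k + 1 + m = k + (m + 1) := by omega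
        rw [this]
      · rw [if_neg h]
        have hd : (decide (target ≤ (lst.take k).sum)) = true := by simp; omega
        rw [hd]

-- pyRange of a natural bound is the mapped List.range
lemma pyRange_zero_ofNat (n : Nat) :
    PySem.List.pyRange 0 (Int.ofNat n) 1 = (List.range n).map Int.ofNat := by
  rw [PySem.List.pyRange_one]
  simp [Int.ofNat_eq_natCast]

-- find? only looks at the predicate's values on members
lemma find?_congr_mem {α : Type} (l : List α) (p q : α → Bool)
    (h : ∀ a ∈ l, p a = q a) : l.find? p = l.find? q := by
  induction l with
  | nil => rfl
  | cons a l ih =>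
      rw [List.find?_cons, List.find?_cons, h a (List.mem_cons_self)]
      cases q a with
      | true => rfl
      | false => exact ih (fun b hb => h b (List.mem_cons_of_mem _ hb))

-- the two find?-predicates agree on the searched range
lemma find?_pred_eq (lst : List Int) (target : Int) :
    (List.range (lst.length - 1)).find? (fun i => target ≤ (prefixTable lst).getD i 0)
    = (List.range (lst.length - 1)).find? (fun i => decide (target ≤ (lst.take i).sum)) := by
  apply find?_congr_mem
  intro i hi
  rw [prefixTable_getD lst i (by simp at hi; omega)]

-- ===== VERDICT (by name: the statement is the Claim_ definition above) =====
theorem SumTwo_spec : Claim_equal_SumTwo := by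
  intro lst target _
  unfold Spec_SumTwo SumTwo SumTwo_alt
  cases lst with
  | nil => simp [sumTwoGo, prefixTable, accumGo]
  | cons x xs =>
      have hlen : ((x :: xs).length : Int) - 1 = Int.ofNat ((x :: xs).length - 1) := by
        simp
      rw [hlen, pyRange_zero_ofNat]
      have key := sumTwoGo_eq (x :: xs) target ((x :: xs).length - 1) 0 (by omega)
      rw [← List.range_eq_range'] at key
      simp only [Nat.zero_add, List.range_zero, List.map_nil, List.take_zero,
        List.sum_nil] at key
      rw [key, find?_pred_eq]
      cases hf : (List.range ((x :: xs).length - 1)).find?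
          (fun i => decide (target ≤ ((x :: xs).take i).sum)) with
      | none =>
          rw [← pyRange_zero_ofNat]
      | some i =>
          rw [← pyRange_zero_ofNat]
          simp [Int.ofNat_eq_natCast]
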